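-- pv_equiv track=rewrite | github.com/bensonlee5/dagzoo | src/dagzoo/core/parallel_generation.py | _result_queue_capacities
-- ===== SOURCE A (Python) =====
-- def _result_queue_capacities(local_worker_count: int, buffer_budget: int) -> list[int]:
--     """Split the total buffered-result budget across local worker queues."""
--
--     worker_count = max(1, int(local_worker_count))
--     effective_budget = max(int(buffer_budget), worker_count)
--     base_capacity, remainder = divmod(effective_budget, worker_count)
--     return [
--         base_capacity + (1 if worker_index < remainder else 0)
--         for worker_index in range(worker_count)
--     ]
-- ===== SOURCE B (Python) =====
-- def _result_queue_capacities(local_worker_count: int, buffer_budget: int) -> list[int]: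
--     """Split the total buffered-result budget across local worker queues."""
--     worker_count = max(1, int(local_worker_count))
--     remaining = max(int(buffer_budget), worker_count)
--     # fair-division loop: each worker takes the ceiling of remaining/workers_left
--     return [
--         ((capacity := -(-remaining // workers_left)),
--          (remaining := remaining - capacity))[0]
--         for workers_left in range(worker_count, 0, -1)
--     ]
-- ===== Notes on version B (the rewrite author's own statement) =====
-- stated objective: alternative
-- what changed: Replaces the single divmod plus per-index conditional comprehension by an iterative fair-division loop that maintains a running remaining budget and gives each worker ceil(remaining/workers_left), performing a fresh ceiling division per worker (correct because ceiling-first fair division yields the larger shares first, exactly matching divmod's remainder-first split).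
import Mathlib
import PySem

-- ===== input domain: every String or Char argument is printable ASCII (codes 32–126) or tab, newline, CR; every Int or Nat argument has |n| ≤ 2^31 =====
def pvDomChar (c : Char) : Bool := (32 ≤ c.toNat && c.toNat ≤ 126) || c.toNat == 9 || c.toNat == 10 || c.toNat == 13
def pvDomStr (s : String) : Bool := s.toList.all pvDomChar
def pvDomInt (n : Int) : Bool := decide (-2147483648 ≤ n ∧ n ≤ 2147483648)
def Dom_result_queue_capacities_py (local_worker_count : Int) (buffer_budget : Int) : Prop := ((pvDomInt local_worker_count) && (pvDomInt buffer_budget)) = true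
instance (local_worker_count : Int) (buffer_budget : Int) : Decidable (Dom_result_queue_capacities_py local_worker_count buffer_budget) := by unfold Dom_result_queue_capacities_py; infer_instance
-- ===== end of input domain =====

-- B replaces the divmod-plus-conditional-comprehension by an iterative fair-division loop:
-- each worker gets ceil(remaining/workers_left) of a running remaining budget (alternative algorithm, same cost).

-- ===== PORT A =====
def result_queue_capacities_py (local_worker_count : Int) (buffer_budget : Int) : List Int :=
  let worker_count := max 1 local_worker_count
  let effective_budget := max buffer_budget worker_count
  let base_capacity := PySem.Int.floordiv effective_budget worker_count
  let remainder := PySem.Int.mod effective_budget worker_count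
  (PySem.List.pyRange 0 worker_count 1).map
    (fun worker_index => base_capacity + (if worker_index < remainder then 1 else 0))

-- ===== PORT B =====
-- the 'for workers_left in range(worker_count, 0, -1)' loop of Source B, recursing on workers_left
def pvDistLoop : Nat → Int → List Int
  | 0, _ => []
  | (k+1), remaining =>
      let capacity := -(PySem.Int.floordiv (-remaining) ((k : Int) + 1))
      capacity :: pvDistLoop k (remaining - capacity)

def result_queue_capacities_py_alt (local_worker_count : Int) (buffer_budget : Int) : List Int :=
  let worker_count := max 1 local_worker_count
  let remaining := max buffer_budget worker_count
  pvDistLoop worker_count.toNat remaining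

-- ===== PRECONDITION & SPEC =====
def Spec_result_queue_capacities_py (local_worker_count : Int) (buffer_budget : Int) (out : List Int) : Prop := out = result_queue_capacities_py_alt local_worker_count buffer_budget
instance (local_worker_count : Int) (buffer_budget : Int) (out : List Int) : Decidable (Spec_result_queue_capacities_py local_worker_count buffer_budget out) := by unfold Spec_result_queue_capacities_py; infer_instance

-- ===== CLAIM (what is proved, stated in full; the proofs are below) =====
def Claim_equal_result_queue_capacities_py : Prop := ∀ (local_worker_count : Int) (buffer_budget : Int), Dom_result_queue_capacities_py local_worker_count buffer_budget → Spec_result_queue_capacities_py local_worker_count buffer_budget (result_queue_capacities_py local_worker_count buffer_budget)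

-- ===== LEMMAS AND PROOFS =====

-- A's comprehension equals the two-block normal form.
theorem pv_blocks (b r n : Int) (hr : 0 ≤ r) (hrn : r ≤ n) :
    (PySem.List.pyRange 0 n 1).map (fun i => b + (if i < r then 1 else 0))
      = List.replicate r.toNat (b + 1) ++ List.replicate (n - r).toNat b := by
  rw [PySem.List.pyRange_one_append 0 r n hr hrn, List.map_append]
  have h1 : (PySem.List.pyRange 0 r 1).map (fun i => b + (if i < r then 1 else 0))
      = List.replicate r.toNat (b + 1) := by
    rw [List.map_congr_left (g := fun _ => b + 1)
        (by intro x hx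
            rw [PySem.List.mem_pyRange_one] at hx
            simp [hx.2])]
    simp [List.map_const', PySem.List.length_pyRange_one]
  have h2 : (PySem.List.pyRange r n 1).map (fun i => b + (if i < r then 1 else 0))
      = List.replicate (n - r).toNat b := by
    rw [List.map_congr_left (g := fun _ => b)
        (by intro x hx
            rw [PySem.List.mem_pyRange_one] at hx
            simp [not_lt.mpr hx.1])]
    simp [List.map_const', PySem.List.length_pyRange_one]
  rw [h1, h2]

-- each step of B's loop hands out the ceiling of remaining/workers_left
theorem pv_cap (T : Int) (k : Nat) :
    -(PySem.Int.floordiv (-T) ((k : Int) + 1))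
      = T / ((k : Int) + 1) + (if T % ((k : Int) + 1) = 0 then 0 else 1) := by
  have hb : (0:Int) < (k : Int) + 1 := by positivity
  rw [PySem.Int.neg_floordiv_neg_eq_iff_of_pos hb]
  have h1 := Int.ediv_add_emod T ((k : Int) + 1)
  have h2 := Int.emod_nonneg T (ne_of_gt hb)
  have h3 := Int.emod_lt_of_pos T hb
  split_ifs with h
  · constructor
    · have e : (T / ((k:Int) + 1) + 0 - 1) * ((k:Int) + 1)
          = ((k:Int) + 1) * (T / ((k:Int) + 1)) - ((k:Int) + 1) := by ring
      rw [e]; linarith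
    · have e : (T / ((k:Int) + 1) + 0) * ((k:Int) + 1)
          = ((k:Int) + 1) * (T / ((k:Int) + 1)) := by ring
      rw [e]; linarith
  · have hr1 : 1 ≤ T % ((k:Int) + 1) := lt_of_le_of_ne h2 (Ne.symm h)
    constructor
    · have e : (T / ((k:Int) + 1) + 1 - 1) * ((k:Int) + 1)
          = ((k:Int) + 1) * (T / ((k:Int) + 1)) := by ring
      rw [e]; linarith
    · have e : (T / ((k:Int) + 1) + 1) * ((k:Int) + 1)
          = ((k:Int) + 1) * (T / ((k:Int) + 1)) + ((k:Int) + 1) := by ring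
      rw [e]; linarith

-- B's loop computes the same two-block normal form.
theorem pv_dist : ∀ (n : Nat) (T : Int), 0 < n →
    pvDistLoop n T
      = List.replicate (T % (n : Int)).toNat (T / (n : Int) + 1)
          ++ List.replicate ((n : Int) - T % (n : Int)).toNat (T / (n : Int)) := by
  intro n
  induction n with
  | zero => intro T h; omega
  | succ k ih =>
    intro T _
    simp only [pvDistLoop]
    have hb : (0:Int) < (k : Int) + 1 := by positivity
    have hcast : ((k + 1 : Nat) : Int) = (k : Int) + 1 := by push_cast; ring
    rw [pv_cap]
    have h1 := Int.ediv_add_emod T ((k : Int) + 1)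
    have h2 := Int.emod_nonneg T (ne_of_gt hb)
    have h3 := Int.emod_lt_of_pos T hb
    set m := T / ((k : Int) + 1) with hm
    set r := T % ((k : Int) + 1) with hr
    rcases Nat.eq_zero_or_pos k with hk | hk
    · -- last worker: loop ends, remainder is 0
      subst hk
      have hr0 : r = 0 := by omega
      have hm0 : m = T := by omega
      rw [hcast, ← hr, ← hm]
      simp [pvDistLoop, hr0, hm0]
    · have hkpos : (0:Int) < (k : Int) := by exact_mod_cast hk
      by_cases h : r = 0
      · -- exact split: everybody else also gets m
        have hT' : T - (m + 0) = 0 + (k : Int) * m := by nlinarith [h1]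
        have hdiv : (T - (m + 0)) / (k : Int) = m := by
          rw [hT', Int.add_mul_ediv_left _ _ (ne_of_gt hkpos)]; simp
        have hmod : (T - (m + 0)) % (k : Int) = 0 := by
          rw [hT', Int.add_mul_emod_self_left]; simp
        rw [if_pos h, ih (T - (m + 0)) hk, hdiv, hmod, hcast, ← hr, ← hm, h]
        have hk1 : ((k : Int) + 1 - 0).toNat = ((k : Int) - 0).toNat + 1 := by omega
        rw [hk1, List.replicate_succ]
        simp
      · -- one unit of the remainder goes to this worker
        have hT' : T - (m + 1) = (r - 1) + (k : Int) * m := by nlinarith [h1]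
        have hrb1 : (0:Int) ≤ r - 1 := by omega
        have hrb2 : r - 1 < (k : Int) := by omega
        have hdiv : (T - (m + 1)) / (k : Int) = m := by
          rw [hT', Int.add_mul_ediv_left _ _ (ne_of_gt hkpos),
              Int.ediv_eq_zero_of_lt hrb1 hrb2]; ring
        have hmod : (T - (m + 1)) % (k : Int) = r - 1 := by
          rw [hT', Int.add_mul_emod_self_left, Int.emod_eq_of_lt hrb1 hrb2]
        rw [if_neg h, ih (T - (m + 1)) hk, hdiv, hmod, hcast, ← hr, ← hm]
        have hrt : r.toNat = (r - 1).toNat + 1 := by omega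
        rw [hrt, List.replicate_succ]
        simp only [List.cons_append]
        have hlen : ((k : Int) - (r - 1)).toNat = ((k : Int) + 1 - r).toNat := by omega
        rw [hlen]

-- ===== VERDICT (by name: the statement is the Claim_ definition above) =====
theorem result_queue_capacities_py_spec : Claim_equal_result_queue_capacities_py := by
  intro lwc bb _
  unfold Spec_result_queue_capacities_py result_queue_capacities_py result_queue_capacities_py_alt
  simp only []
  set wc := max 1 lwc with hwc
  have hwcpos : 0 < wc := lt_max_iff.mpr (Or.inl one_pos)
  set eff := max bb wc with heff
  have hfd : PySem.Int.floordiv eff wc = eff / wc := PySem.Int.floordiv_eq_ediv_of_pos hwcpos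
  have hmod : PySem.Int.mod eff wc = eff % wc := PySem.Int.mod_eq_emod_of_pos hwcpos
  have hr0 : 0 ≤ eff % wc := Int.emod_nonneg _ (ne_of_gt hwcpos)
  have hrn : eff % wc ≤ wc := le_of_lt (Int.emod_lt_of_pos _ hwcpos)
  have hcast : ((wc.toNat : Int)) = wc := Int.toNat_of_nonneg (le_of_lt hwcpos)
  rw [hfd, hmod, pv_blocks _ _ _ hr0 hrn, pv_dist wc.toNat eff (by omega), hcast]
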